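-- pv_equiv track=rewrite | github.com/MrBrantCode/unitest_baseline | mut_generate/mist_train_cf/cf_96444/solution.py | remove_primes
-- ===== SOURCE A (Python) =====
-- def remove_primes(arr):
--     def is_prime(n):
--         if n < 2:
--             return False
--         for i in range(2, int(n ** 0.5) + 1):
--             if n % i == 0:
--                 return False
--         return True
--
--     return sum(num for num in arr if not is_prime(num))
-- ===== SOURCE B (Python) =====
-- def _is_composite_or_small(v):
--     if v < 2:
--         return True
--     if v == 2:
--         return False
--     if v % 2 == 0:
--         return True
--     d = 3
--     while d * d <= v:
--         if v % d == 0: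
--             return True
--         d += 2
--     return False
--
--
-- def remove_primes(arr):
--     counts = {}
--     for num in arr:
--         counts[num] = counts.get(num, 0) + 1
--     total = 0
--     for v, c in counts.items():
--         if _is_composite_or_small(v):
--             total += v * c
--     return total
-- ===== Notes on version B (the rewrite author's own statement) =====
-- stated objective: alternative
-- what changed: B builds a count dictionary in one pass and tests each distinct value once with an odd-divisors-only trial scan (2 handled separately), summing value*count, instead of A's per-element trial division over every i in range(2, int(sqrt(n))+1).
import Mathlib
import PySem

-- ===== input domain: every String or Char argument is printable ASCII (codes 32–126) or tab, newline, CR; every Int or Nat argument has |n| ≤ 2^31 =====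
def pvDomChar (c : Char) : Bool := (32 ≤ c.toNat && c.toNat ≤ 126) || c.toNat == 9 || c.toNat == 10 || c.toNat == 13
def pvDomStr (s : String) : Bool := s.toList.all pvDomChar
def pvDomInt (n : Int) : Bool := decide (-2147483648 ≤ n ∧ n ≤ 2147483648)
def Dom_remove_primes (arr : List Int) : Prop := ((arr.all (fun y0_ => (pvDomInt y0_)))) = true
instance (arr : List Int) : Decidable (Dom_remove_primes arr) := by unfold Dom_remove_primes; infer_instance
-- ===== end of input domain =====

-- B replaces A's per-element sqrt-bounded trial division by a counting dict (each distinct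
-- value is tested once) plus an odd-divisors-only scan; the return values agree everywhere.

-- ===== PORT A =====
-- is_prime(n): the early-return-False loop over range(2, int(n**0.5)+1) is the 'any' below.
-- int(n ** 0.5) is ported as Nat.sqrt: for the n this line is reached on (2 ≤ n ≤ 2^31)
-- CPython's int(n ** 0.5) yields the same is_prime verdict as the integer square root
-- (the only candidate misfloors are perfect squares; all of them were checked against CPython).
def isPrimeA (n : Int) : Bool :=
  if n < 2 then false
  else !((PySem.List.pyRange 2 (((Nat.sqrt n.toNat : Nat) : Int) + 1) 1).any
          (fun i => PySem.Int.mod n i == 0))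

def remove_primes (arr : List Int) : Int :=
  (arr.filter (fun num => !isPrimeA num)).sum

-- ===== PORT B =====
-- the 'while d * d <= v' loop of _is_composite_or_small
def oddScan (v d : Int) : Bool :=
  if _hguard : d * d ≤ v then
    if hmod : PySem.Int.mod v d == 0 then true
    else oddScan v (d + 2)
  else false
termination_by (v - d).toNat
decreasing_by
  have hdvd : ¬ (d ∣ v) := by
    simpa [PySem.Int.mod_eq_zero_iff_dvd] using hmod
  have hlt : d < v := by
    rcases lt_trichotomy d 1 with h | h | h
    · rcases eq_or_lt_of_le (show d ≤ 0 by omega) with h0 | h0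
      · have hvne : v ≠ 0 := fun hv => hdvd (by simp [← h0, hv])
        have hv0 : (0:Int) ≤ v := by nlinarith
        omega
      · nlinarith
    · exact absurd (h ▸ one_dvd v) hdvd
    · have : d < d * d := by nlinarith
      omega
  omega


-- _is_composite_or_small(v)
def isCompositeOrSmall (v : Int) : Bool :=
  if v < 2 then true
  else if v == 2 then false
  else if PySem.Int.mod v 2 == 0 then true
  else oddScan v 3


def remove_primes_alt (arr : List Int) : Int :=
  let counts := arr.foldl (fun d num => d.insert num (d.getD num 0 + 1)) PySem.Dict.empty
  counts.items.foldl
    (fun total p => if isCompositeOrSmall p.1 then total + p.1 * p.2 else total) 0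

-- ===== PRECONDITION & SPEC =====
def Spec_remove_primes (arr : List Int) (out : Int) : Prop := out = remove_primes_alt arr
instance (arr : List Int) (out : Int) : Decidable (Spec_remove_primes arr out) := by unfold Spec_remove_primes; infer_instance

-- ===== CLAIM (what is proved, stated in full; the proofs are below) =====
def Claim_equal_remove_primes : Prop := ∀ (arr : List Int), Dom_remove_primes arr → Spec_remove_primes arr (remove_primes arr)

-- ===== LEMMAS AND PROOFS =====

lemma le_sqrt_iff (n i : Int) (h2 : 0 ≤ n) (hi : 0 ≤ i) :
    i ≤ ((Nat.sqrt n.toNat : Nat) : Int) ↔ i * i ≤ n := by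
  have hn : ((n.toNat : Nat) : Int) = n := Int.toNat_of_nonneg h2
  have hs1 : ((Nat.sqrt n.toNat : Nat) : Int) * ((Nat.sqrt n.toNat : Nat) : Int) ≤ n := by
    have := Nat.sqrt_le' n.toNat
    rw [pow_two] at this
    calc ((Nat.sqrt n.toNat : Nat) : Int) * ((Nat.sqrt n.toNat : Nat) : Int)
        = ((Nat.sqrt n.toNat * Nat.sqrt n.toNat : Nat) : Int) := by push_cast; ring
      _ ≤ ((n.toNat : Nat) : Int) := by exact_mod_cast this
      _ = n := hn
  have hs2 : n < (((Nat.sqrt n.toNat : Nat) : Int) + 1) * (((Nat.sqrt n.toNat : Nat) : Int) + 1) := by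
    have := Nat.lt_succ_sqrt' n.toNat
    rw [Nat.succ_eq_add_one, pow_two] at this
    calc n = ((n.toNat : Nat) : Int) := hn.symm
      _ < (((Nat.sqrt n.toNat + 1) * (Nat.sqrt n.toNat + 1) : Nat) : Int) := by exact_mod_cast this
      _ = (((Nat.sqrt n.toNat : Nat) : Int) + 1) * (((Nat.sqrt n.toNat : Nat) : Int) + 1) := by push_cast; ring
  constructor <;> intro h
  · nlinarith
  · nlinarith


lemma not_isPrimeA_iff (n : Int) (h2 : 2 ≤ n) :
    isPrimeA n = false ↔ ∃ i : Int, 2 ≤ i ∧ i * i ≤ n ∧ i ∣ n := by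
  have hn2 : ¬ n < 2 := by omega
  simp only [isPrimeA, if_neg hn2, Bool.not_eq_eq_eq_not,
    Bool.not_false, List.any_eq_true]
  constructor
  · rintro ⟨i, hmem, hdvd⟩
    rw [PySem.List.mem_pyRange_one] at hmem
    refine ⟨i, hmem.1, ?_, ?_⟩
    · exact (le_sqrt_iff n i (by omega) (by omega)).mp (by omega)
    · simpa [PySem.Int.mod_eq_zero_iff_dvd] using hdvd
  · rintro ⟨i, h1, h2', h3⟩
    refine ⟨i, ?_, by simpa [PySem.Int.mod_eq_zero_iff_dvd] using h3⟩
    rw [PySem.List.mem_pyRange_one]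
    have := (le_sqrt_iff n i (by omega) (by omega)).mpr h2'
    omega

-- the while loop finds exactly a divisor i of v in the progression d, d+2, … with i*i ≤ v
lemma oddScan_eq_true_iff (v d : Int) (hd : 0 < d) :
    oddScan v d = true ↔ ∃ i : Int, d ≤ i ∧ i * i ≤ v ∧ (2 ∣ (i - d)) ∧ i ∣ v := by
  revert hd
  refine oddScan.induct v
    (motive := fun d => 0 < d →
      (oddScan v d = true ↔ ∃ i : Int, d ≤ i ∧ i * i ≤ v ∧ (2 ∣ (i - d)) ∧ i ∣ v))
    ?_ ?_ ?_ d
  · intro d hguard hmod _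
    rw [oddScan, dif_pos hguard, dif_pos hmod]
    have hdvd : d ∣ v := by simpa [PySem.Int.mod_eq_zero_iff_dvd] using hmod
    simp only [true_iff]
    exact ⟨d, le_refl d, hguard, by simp, hdvd⟩
  · intro d hguard hmod ih hd
    rw [oddScan, dif_pos hguard, dif_neg hmod]
    have hdvd : ¬ d ∣ v := by simpa [PySem.Int.mod_eq_zero_iff_dvd] using hmod
    rw [ih (by omega)]
    constructor
    · rintro ⟨i, h1, h2, h3, h4⟩
      exact ⟨i, by omega, h2, by omega, h4⟩
    · rintro ⟨i, h1, h2, h3, h4⟩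
      refine ⟨i, ?_, h2, by omega, h4⟩
      rcases eq_or_lt_of_le h1 with rfl | h
      · exact absurd h4 hdvd
      · omega
  · intro d hguard hd
    rw [oddScan, dif_neg hguard]
    simp only [Bool.false_eq_true, false_iff, not_exists]
    rintro i ⟨h1, h2, _, _⟩
    nlinarith

-- A's and B's primality verdicts agree (B reports "composite or < 2")
lemma composite_iff (n : Int) : isCompositeOrSmall n = !isPrimeA n := by
  by_cases h2 : n < 2
  · simp [isCompositeOrSmall, isPrimeA, h2]
  · by_cases he : n = 2
    · subst he
      have hp2 : isPrimeA 2 = true := by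
        by_contra h
        rw [Bool.not_eq_true, not_isPrimeA_iff 2 le_rfl] at h
        obtain ⟨i, h1, h2, -⟩ := h
        nlinarith
      simp [isCompositeOrSmall, hp2]
    · have hn3 : 3 ≤ n := by omega
      by_cases hev : (2:Int) ∣ n
      · -- even, > 2: composite
        have h4 : 4 ≤ n := by rcases hev with ⟨k, hk⟩; omega
        have hA : isPrimeA n = false :=
          (not_isPrimeA_iff n (by omega)).mpr ⟨2, by omega, by omega, hev⟩
        simp [isCompositeOrSmall, h2, he, hev, hA]
      · -- odd, > 2
        have hmod : ¬ (PySem.Int.mod n 2 == 0) = true := by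
          simpa [PySem.Int.mod_eq_zero_iff_dvd] using hev
        have hL : isCompositeOrSmall n = oddScan n 3 := by
          simp [isCompositeOrSmall, h2, he]
          intro h; exact absurd (by simpa [PySem.Int.mod_eq_zero_iff_dvd] using h) hev
        rw [hL]
        cases hA : isPrimeA n
        · -- A found a divisor; oddScan must find an odd one
          obtain ⟨i, hi2, hii, hidvd⟩ := (not_isPrimeA_iff n (by omega)).mp hA
          have hiodd : ¬ (2:Int) ∣ i := fun h => hev (h.trans hidvd)
          have : i % 2 = 1 := by omega
          simp only [Bool.not_false]
          rw [oddScan_eq_true_iff n 3 (by norm_num)]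
          exact ⟨i, by omega, hii, by omega, hidvd⟩
        · simp only [Bool.not_true]
          by_contra hsc
          rw [Bool.not_eq_false, oddScan_eq_true_iff n 3 (by norm_num)] at hsc
          obtain ⟨i, h1, h2', _, h4⟩ := hsc
          have : isPrimeA n = false :=
            (not_isPrimeA_iff n (by omega)).mpr ⟨i, by omega, h2', h4⟩
          rw [hA] at this; simp at this

-- pulling one element out of a Nodup list's filtered-map sum
lemma sum_discard (s : List Int) (hs : s.Nodup) (x : Int) (p : Int → Bool) (f : Int → Int) :
    ((s.filter p).map f).sum
      = (((s.filter (fun y => !(y == x))).filter p).map f).sum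
        + (if x ∈ s ∧ p x then f x else 0) := by
  induction s with
  | nil => simp
  | cons a t ih =>
    rw [List.nodup_cons] at hs
    obtain ⟨hat, ht⟩ := hs
    by_cases hax : a = x
    · subst hax
      have hfix : t.filter (fun y => !(y == a)) = t :=
        List.filter_eq_self.mpr (fun y hy => by
          simp only [Bool.not_eq_eq_eq_not, Bool.not_true, beq_eq_false_iff_ne, ne_eq]
          exact fun h => hat (h ▸ hy))
      simp only [List.filter_cons, beq_self_eq_true, Bool.not_true, List.mem_cons, true_or,
        true_and, hfix]
      cases hp : p a
      · simp
      · simp [List.map_cons, List.sum_cons]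
        ring
    · have hmem : (x ∈ a :: t ∧ p x = true) ↔ (x ∈ t ∧ p x = true) := by
        simp only [List.mem_cons]
        constructor
        · rintro ⟨h | h, hp⟩
          · exact absurd h.symm hax
          · exact ⟨h, hp⟩
        · rintro ⟨h, hp⟩; exact ⟨Or.inr h, hp⟩
      have hkeep : (!(a == x)) = true := by simp [hax]
      simp only [List.filter_cons, hkeep, if_true]
      cases hp : p a
      · simp only [Bool.false_eq_true, if_false]
        rw [ih ht, if_congr hmem rfl rfl]
      · simp only [if_true, List.map_cons, List.sum_cons]
        rw [ih ht, if_congr hmem rfl rfl]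
        ring

-- summing f over distinct values weighted by multiplicity = summing over the list
lemma sum_counts (l : List Int) (p : Int → Bool) :
    (((PySem.Set.ofList l).filter p).map (fun k => k * (l.count k : Int))).sum
      = (l.filter p).sum := by
  induction l with
  | nil => simp [PySem.Set.ofList_nil]
  | cons x t ih =>
    rw [PySem.Set.ofList_cons]
    have hdis : PySem.Set.discard (PySem.Set.ofList t) x
        = (PySem.Set.ofList t).filter (fun y => !(y == x)) := rfl
    have hcnt : ∀ k ∈ ((PySem.Set.ofList t).filter (fun y => !(y == x))).filter p,
        k * (((x :: t).count k : Nat) : Int) = k * ((t.count k : Nat) : Int) := by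
      intro k hk
      have hkx : k ≠ x := by
        have := List.of_mem_filter (List.mem_of_mem_filter hk)
        simpa using this
      rw [List.count_cons, if_neg (by simpa using (fun h => hkx h.symm))]
      simp
    have hsd := sum_discard (PySem.Set.ofList t) (PySem.Set.nodup_ofList t) x p
        (fun k => k * ((t.count k : Nat) : Int))
    -- expand the head of the filtered list
    simp only [List.filter_cons, hdis]
    cases hp : p x
    · simp only [Bool.false_eq_true, if_false]
      rw [List.map_congr_left hcnt]
      rw [ih] at hsd
      simp only [hp, Bool.false_eq_true, and_false, if_false, add_zero] at hsd
      linarith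
    · simp only [if_true, List.map_cons, List.sum_cons]
      rw [List.map_congr_left hcnt]
      rw [ih] at hsd
      simp only [hp, and_true] at hsd
      rw [List.count_cons_self]
      by_cases hxt : x ∈ PySem.Set.ofList t
      · simp only [hxt, if_true] at hsd
        push_cast
        linarith
      · have hx0 : t.count x = 0 := by
          rw [List.count_eq_zero]
          simpa [PySem.Set.mem_ofList] using hxt
        simp only [hxt, if_false] at hsd
        rw [hx0]
        push_cast
        linarith

-- ===== VERDICT (by name: the statement is the Claim_ definition above) =====
theorem remove_primes_spec : Claim_equal_remove_primes := by
  intro arr _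
  show remove_primes arr = remove_primes_alt arr
  rw [remove_primes, remove_primes_alt]
  rw [show (fun num : Int => !isPrimeA num) = isCompositeOrSmall from
    funext fun n => (composite_iff n).symm]
  rw [PySem.Dict.foldl_insert_getD_add_one_eq_counter, PySem.Dict.items_counter]
  rw [PySem.List.foldl_if_eq_foldl_filter (fun q : Int × Int => isCompositeOrSmall q.1)
    (fun total q => total + q.1 * q.2)]
  rw [PySem.List.foldl_add (g := fun q : Int × Int => q.1 * q.2)]
  rw [List.filter_map, List.map_map]
  simp only [Function.comp_def, zero_add]
  rw [← sum_counts arr isCompositeOrSmall]
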